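-- pv_equiv track=rewrite | github.com/mingbuckcho/HomePlate | AWS/hp-ai-back/services.py | resolve_layer
-- ===== SOURCE A (Python) =====
-- from typing import Any
--
-- ALERTNAME_LAYER_MAP = {
--     "Node": "infrastructure",
--     "Pod": "infrastructure",
--     "Container": "infrastructure",
--     "Deployment": "infrastructure",
--     "PVC": "infrastructure",
--     "Scrape": "infrastructure",
--     "Job": "infrastructure",
--     "ArgoCD": "delivery",
--     "Jenkins": "delivery",
--     "Harbor": "delivery",
--     "Prometheus": "observability",
--     "Loki": "observability",
--     "Tempo": "observability",
--     "Grafana": "observability",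
--     "MongoDB": "data",
--     "MariaDB": "data",
--     "Redis": "data",
--     "MinIO": "data",
--     "Ingress": "ux",
--     "HAProxy": "ux",
--     "Frontend": "ux",
--     "Backend": "application",
--     "Worker": "application",
-- }
--
-- LAYER_ALLOWED = frozenset(
--     {"infrastructure", "delivery", "observability", "data", "ux", "application", "unknown"}
-- )
--
-- def resolve_layer(labels: dict[str, Any], alertname: str | None) -> str:
--     """
--     - labels["layer"] 있으면 소문자 normalize 후 허용 집합에 있으면 사용, 없으면 "unknown"
--     - 없으면 alertname prefix 매핑 (긴 키 우선), 매칭 없으면 "unknown"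
--     """
--     layer_label = (labels.get("layer") or "").strip()
--     if layer_label:
--         normalized = layer_label.lower()
--         return normalized if normalized in LAYER_ALLOWED else "unknown"
--
--     name = (alertname or "").strip()
--     if not name:
--         return "unknown"
--
--     # 긴 prefix 먼저 매칭 (예: BackendDown → Backend)
--     for key in sorted(ALERTNAME_LAYER_MAP.keys(), key=len, reverse=True):
--         if name.startswith(key):
--             return ALERTNAME_LAYER_MAP[key]
--     return "unknown"
-- ===== SOURCE B (Python) =====
-- from typing import Any
--
-- ALERTNAME_LAYER_MAP = {
--     "Node": "infrastructure",
--     "Pod": "infrastructure",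
--     "Container": "infrastructure",
--     "Deployment": "infrastructure",
--     "PVC": "infrastructure",
--     "Scrape": "infrastructure",
--     "Job": "infrastructure",
--     "ArgoCD": "delivery",
--     "Jenkins": "delivery",
--     "Harbor": "delivery",
--     "Prometheus": "observability",
--     "Loki": "observability",
--     "Tempo": "observability",
--     "Grafana": "observability",
--     "MongoDB": "data",
--     "MariaDB": "data",
--     "Redis": "data",
--     "MinIO": "data",
--     "Ingress": "ux",
--     "HAProxy": "ux",
--     "Frontend": "ux",
--     "Backend": "application",
--     "Worker": "application",
-- }
--
-- LAYER_ALLOWED = frozenset(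
--     {"infrastructure", "delivery", "observability", "data", "ux", "application", "unknown"}
-- )
--
-- _MAX_KEY_LEN = max(map(len, ALERTNAME_LAYER_MAP))
--
-- def resolve_layer(labels: dict[str, Any], alertname: str | None) -> str:
--     layer_label = (labels.get("layer") or "").strip()
--     if layer_label:
--         normalized = layer_label.lower()
--         return normalized if normalized in LAYER_ALLOWED else "unknown"
--
--     name = (alertname or "").strip()
--     # longest-prefix dict lookup: try name[:L] for decreasing L, hash lookup per prefix
--     for L in range(min(len(name), _MAX_KEY_LEN), 0, -1):
--         layer = ALERTNAME_LAYER_MAP.get(name[:L])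
--         if layer is not None:
--             return layer
--     return "unknown"
-- ===== Notes on version B (the rewrite author's own statement) =====
-- stated objective: idiomatic
-- what changed: replaces the sort-all-keys-by-length-then-startswith-scan with a longest-prefix dict lookup: slice name[:L] for L from len(name) down to 1 and return the first hash hit
import Mathlib
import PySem

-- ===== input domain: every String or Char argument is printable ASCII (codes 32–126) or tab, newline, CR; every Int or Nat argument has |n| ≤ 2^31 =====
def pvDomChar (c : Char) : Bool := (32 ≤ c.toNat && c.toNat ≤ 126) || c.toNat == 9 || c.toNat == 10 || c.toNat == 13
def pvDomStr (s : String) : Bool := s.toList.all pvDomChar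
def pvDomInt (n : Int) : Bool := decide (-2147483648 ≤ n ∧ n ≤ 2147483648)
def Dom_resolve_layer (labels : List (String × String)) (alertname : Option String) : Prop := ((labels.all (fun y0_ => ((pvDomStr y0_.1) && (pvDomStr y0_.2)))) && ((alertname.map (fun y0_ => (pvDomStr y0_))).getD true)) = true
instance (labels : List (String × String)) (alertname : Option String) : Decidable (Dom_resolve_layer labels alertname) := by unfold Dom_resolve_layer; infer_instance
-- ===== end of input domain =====

-- B replaces A's "sort map keys by length, scan for the first startswith hit" with a
-- longest-prefix dict lookup (try name[:L] for L = len(name)..1); objective: idiomatic.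

-- ===== PORT A =====
def pvLayerMap : PySem.Dict String String := PySem.Dict.ofList
  [("Node", "infrastructure"), ("Pod", "infrastructure"), ("Container", "infrastructure"),
   ("Deployment", "infrastructure"), ("PVC", "infrastructure"), ("Scrape", "infrastructure"),
   ("Job", "infrastructure"), ("ArgoCD", "delivery"), ("Jenkins", "delivery"),
   ("Harbor", "delivery"), ("Prometheus", "observability"), ("Loki", "observability"),
   ("Tempo", "observability"), ("Grafana", "observability"), ("MongoDB", "data"),
   ("MariaDB", "data"), ("Redis", "data"), ("MinIO", "data"), ("Ingress", "ux"),
   ("HAProxy", "ux"), ("Frontend", "ux"), ("Backend", "application"), ("Worker", "application")]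

def pvLayerAllowed : PySem.Set String := PySem.Set.ofList
  ["infrastructure", "delivery", "observability", "data", "ux", "application", "unknown"]

-- A's for-loop over the sorted keys: first key with name.startswith(key) wins
def pvLoopA (name : String) : List String → String
  | [] => "unknown"
  | k :: rest =>
      if PySem.Str.startswith name k then (PySem.Dict.get? pvLayerMap k).getD "unknown"
      else pvLoopA name rest

def resolve_layer (labels : List (String × String)) (alertname : Option String) : String :=
  let layer_label := PySem.Str.strip (((PySem.Dict.mk labels).get? "layer").getD "")
  if layer_label ≠ "" then
    let normalized := PySem.Str.lower layer_label
    if pvLayerAllowed.contains normalized then normalized else "unknown"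
  else
    let name := PySem.Str.strip (alertname.getD "")
    if name = "" then "unknown"
    else pvLoopA name (PySem.List.sorted pvLayerMap.keys (fun k => PySem.Str.len k) true)

-- ===== PORT B =====
-- B's _MAX_KEY_LEN = max(map(len, ALERTNAME_LAYER_MAP)); hand port of max() over this
-- nonempty list of key lengths (len k = k.toList.length, PySem.Chars.len_eq): foldl max 0
-- is exact here, since all lengths are ≥ 0 and the list is nonempty
def pvMaxKeyLen : Nat := (pvLayerMap.keys.map (fun k => k.toList.length)).foldl max 0

-- B's for-loop over L = min(len(name), _MAX_KEY_LEN) .. 1: first L with name[:L] a key of the map wins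
def pvLoopB (name : List Char) : Nat → String
  | 0 => "unknown"
  | L + 1 =>
      match PySem.Dict.get? pvLayerMap (String.ofList (name.take (L + 1))) with
      | some layer => layer
      | none => pvLoopB name L

def resolve_layer_alt (labels : List (String × String)) (alertname : Option String) : String :=
  let layer_label := PySem.Str.strip (((PySem.Dict.mk labels).get? "layer").getD "")
  if layer_label ≠ "" then
    let normalized := PySem.Str.lower layer_label
    if pvLayerAllowed.contains normalized then normalized else "unknown"
  else
    let name := PySem.Str.strip (alertname.getD "")
    pvLoopB name.toList (min name.toList.length pvMaxKeyLen)

-- ===== PRECONDITION & SPEC =====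
def Spec_resolve_layer (labels : List (String × String)) (alertname : Option String) (out : String) : Prop := out = resolve_layer_alt labels alertname
instance (labels : List (String × String)) (alertname : Option String) (out : String) : Decidable (Spec_resolve_layer labels alertname out) := by unfold Spec_resolve_layer; infer_instance

-- ===== CLAIM (what is proved, stated in full; the proofs are below) =====
def Claim_equal_resolve_layer : Prop := ∀ (labels : List (String × String)) (alertname : Option String), Dom_resolve_layer labels alertname → Spec_resolve_layer labels alertname (resolve_layer labels alertname)

-- ===== LEMMAS AND PROOFS =====

lemma pvStartswith_iff (s p : String) :
    PySem.Str.startswith s p = true ↔ p.toList <+: s.toList := by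
  simp [PySem.Chars.startswith_iff]

-- no map key is a prefix of a different map key (checked over the 23 literal keys)
lemma pvKeys_prefix_uniq : ∀ k1 ∈ pvLayerMap.keys, ∀ k2 ∈ pvLayerMap.keys,
    k1.toList <+: k2.toList → k1 = k2 := by decide

lemma pvKeys_ne_nil : ∀ k ∈ pvLayerMap.keys, k.toList ≠ [] := by decide

lemma pvKeys_len_le : ∀ k ∈ pvLayerMap.keys, k.toList.length ≤ pvMaxKeyLen := by decide

lemma pvKeys_get?_isSome : ∀ k ∈ pvLayerMap.keys, (PySem.Dict.get? pvLayerMap k).isSome := by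
  decide

lemma pvLoopA_none (name : String) (l : List String)
    (h : ∀ k ∈ l, ¬ (k.toList <+: name.toList)) : pvLoopA name l = "unknown" := by
  induction l with
  | nil => rfl
  | cons a rest ih =>
      have ha : PySem.Str.startswith name a = false := by
        rw [Bool.eq_false_iff]
        intro hs
        exact h a List.mem_cons_self ((pvStartswith_iff name a).mp hs)
      rw [pvLoopA, ha, if_neg (by simp)]
      exact ih (fun k hk => h k (List.mem_cons_of_mem _ hk))

lemma pvLoopB_none (cs : List Char) (n : Nat)
    (h : ∀ L, 1 ≤ L → L ≤ n → PySem.Dict.get? pvLayerMap (String.ofList (cs.take L)) = none) :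
    pvLoopB cs n = "unknown" := by
  induction n with
  | zero => rfl
  | succ m ih =>
      have hm := h (m + 1) (by omega) (by omega)
      rw [pvLoopB, hm]
      exact ih (fun L h1 h2 => h L h1 (by omega))

lemma pvLoopA_found (name : String) (k0 : String)
    (hp : k0.toList <+: name.toList)
    (l : List String) (hmem : k0 ∈ l)
    (huniq : ∀ k ∈ l, k.toList <+: name.toList → k = k0) :
    pvLoopA name l = (PySem.Dict.get? pvLayerMap k0).getD "unknown" := by
  induction l with
  | nil => cases hmem
  | cons a rest ih =>
      cases hs : PySem.Str.startswith name a with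
      | true =>
          have hak : a = k0 := huniq a List.mem_cons_self ((pvStartswith_iff name a).mp hs)
          rw [pvLoopA, hs, if_pos rfl, hak]
      | false =>
          have hak : a ≠ k0 := by
            intro he
            rw [he, (pvStartswith_iff name k0).mpr hp] at hs
            cases hs
          have hmem' : k0 ∈ rest := by
            rcases List.mem_cons.mp hmem with h' | h'
            · exact absurd h'.symm hak
            · exact h'
          rw [pvLoopA, hs, if_neg (by simp)]
          exact ih hmem' (fun k hk => huniq k (List.mem_cons_of_mem _ hk))

lemma pvLoopB_found (cs : List Char) (k0 : String)
    (hk0 : k0 ∈ pvLayerMap.keys)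
    (hp : k0.toList <+: cs)
    (h1 : 1 ≤ k0.toList.length) :
    ∀ n, k0.toList.length ≤ n →
    (∀ L, k0.toList.length < L → L ≤ n →
        PySem.Dict.get? pvLayerMap (String.ofList (cs.take L)) = none) →
    pvLoopB cs n = (PySem.Dict.get? pvLayerMap k0).getD "unknown" := by
  intro n
  induction n with
  | zero => intro hle _; omega
  | succ m ih =>
      intro hle hnone
      rcases Nat.lt_or_ge m (k0.toList.length) with hlt | hge
      · -- m + 1 = len(k0): the hit
        have he : k0.toList.length = m + 1 := by omega
        have htake : cs.take (m + 1) = k0.toList := by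
          rw [← he]; exact (List.prefix_iff_eq_take.mp hp).symm
        have hmk : String.ofList (cs.take (m + 1)) = k0 := by
          rw [htake, String.ofList_toList]
        obtain ⟨v, hv⟩ := Option.isSome_iff_exists.mp (pvKeys_get?_isSome k0 hk0)
        rw [pvLoopB, hmk, hv]
        rfl
      · -- len(k0) ≤ m: this level misses, recurse
        have hm := hnone (m + 1) (by omega) (by omega)
        rw [pvLoopB, hm]
        exact ih hge (fun L ha hb => hnone L ha (by omega))

-- a prefix of cs that is a key of the map is in the key list, with the right length
lemma pvTake_key_prefix (cs : List Char) (L : Nat) (hL : L ≤ cs.length)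
    (h : PySem.Dict.get? pvLayerMap (String.ofList (cs.take L)) ≠ none) :
    ∃ k ∈ pvLayerMap.keys, k.toList <+: cs ∧ k.toList.length = L := by
  have hk : String.ofList (cs.take L) ∈ pvLayerMap.keys := by
    by_contra hnk
    exact h ((PySem.Dict.get?_eq_none_iff_not_mem_keys _ _).mpr hnk)
  refine ⟨String.ofList (cs.take L), hk, ?_, ?_⟩
  · rw [String.toList_ofList]; exact List.take_prefix L cs
  · rw [String.toList_ofList, List.length_take]; omega

lemma pvLoop_eq (name : String) :
    pvLoopA name (PySem.List.sorted pvLayerMap.keys (fun k => PySem.Str.len k) true)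
      = pvLoopB name.toList (min name.toList.length pvMaxKeyLen) := by
  set cs := name.toList with hcs
  by_cases h : ∃ k ∈ pvLayerMap.keys, k.toList <+: cs
  · obtain ⟨k0, hk0, hp⟩ := h
    have huniq : ∀ k ∈ pvLayerMap.keys, k.toList <+: cs → k = k0 := by
      intro k hk hkp
      rcases List.prefix_or_prefix_of_prefix hkp hp with h' | h'
      · exact pvKeys_prefix_uniq k hk k0 hk0 h'
      · exact (pvKeys_prefix_uniq k0 hk0 k hk h').symm
    rw [pvLoopA_found name k0 hp _
          (by rw [PySem.List.mem_sorted]; exact hk0)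
          (fun k hk => huniq k (by rw [PySem.List.mem_sorted] at hk; exact hk)),
        pvLoopB_found cs k0 hk0 hp
          (by have hne := pvKeys_ne_nil k0 hk0
              cases hl : k0.toList with
              | nil => exact absurd hl hne
              | cons a t => simp)
          (min cs.length pvMaxKeyLen)
          (Nat.le_min.mpr ⟨hp.length_le, pvKeys_len_le k0 hk0⟩)
          (fun L hgt hle => by
            by_contra hne
            obtain ⟨k, hk, hkp, hklen⟩ :=
              pvTake_key_prefix cs L (le_trans hle (Nat.min_le_left _ _)) hne
            have hkk := huniq k hk hkp
            subst hkk; omega)]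
  · push Not at h
    rw [pvLoopA_none name _
          (fun k hk => h k (by rw [PySem.List.mem_sorted] at hk; exact hk)),
        pvLoopB_none cs (min cs.length pvMaxKeyLen)
          (fun L h1 h2 => by
            by_contra hne
            obtain ⟨k, hk, hkp, _⟩ :=
              pvTake_key_prefix cs L (le_trans h2 (Nat.min_le_left _ _)) hne
            exact h k hk hkp)]

-- ===== VERDICT (by name: the statement is the Claim_ definition above) =====
set_option maxHeartbeats 1000000 in
theorem resolve_layer_spec : Claim_equal_resolve_layer := by
  intro labels alertname _
  unfold Spec_resolve_layer resolve_layer resolve_layer_alt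
  simp only [ne_eq]
  by_cases h1 : PySem.Str.strip (((PySem.Dict.mk labels).get? "layer").getD "") = ""
  · rw [if_neg (not_not_intro h1), if_neg (not_not_intro h1)]
    by_cases h2 : PySem.Str.strip (alertname.getD "") = ""
    · rw [if_pos h2, h2]; decide
    · rw [if_neg h2]; exact pvLoop_eq _
  · rw [if_pos h1, if_pos h1]
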